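-- pv_equiv track=rewrite | github.com/donghaozhang/Leetcode_play | leetcode_questions/binary_search/copy_books/copy_books.py | copy_books_binary_search
-- ===== SOURCE A (Python) =====
-- def copy_books_binary_search(pages, k):
--     """
--     二分答案法解决抄书问题
--     :param pages: List[int]，每本书的页数
--     :param k: int，抄写员人数
--     :return: int，最少需要的时间
--     """
--     if not pages:
--         return 0
--     if k >= len(pages):
--         return max(pages)  # 每人最多抄一本书
--
--     def is_feasible(limit):
--         """判断在给定时间限制下是否能完成抄写"""
--         count = 1  # 当前需要的抄写员数量
--         current_sum = 0  # 当前抄写员的工作量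
--
--         for page in pages:
--             if page > limit:  # 单本书超过时间限制
--                 return False
--             if current_sum + page > limit:
--                 count += 1  # 需要新的抄写员
--                 current_sum = page
--             else:
--                 current_sum += page
--
--         return count <= k
--
--     # 二分查找最小的可行时间
--     left = max(pages)  # 最小可能的时间（最大页数）
--     right = sum(pages)  # 最大可能的时间（所有页数之和）
--
--     while left + 1 < right:
--         mid = (left + right) // 2
--         if is_feasible(mid):
--             right = mid  # 尝试更小的时间限制
--         else:
--             left = mid  # 需要更多时间
--
--     return left if is_feasible(left) else right
-- ===== SOURCE B (Python) =====
-- def copy_books_binary_search(pages, k):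
--     """Interval-partition DP over prefix sums instead of binary search on the answer."""
--     if not pages:
--         return 0
--     n = len(pages)
--     if k >= n:
--         return max(pages)
--     pre = [0]
--     for p in pages:
--         pre.append(pre[-1] + p)
--     # one copier (also what falls out for k <= 1): dp[1][i] = pre[i]
--     row = pre
--     for _ in range(k - 1):
--         row = [min(max(row[t], pre[i] - pre[t]) for t in range(i + 1))
--                for i in range(n + 1)]
--     return row[n]
-- ===== Notes on version B (the rewrite author's own statement) =====
-- stated objective: alternative
-- what changed: Replaces binary search on the answer with greedy feasibility checks by the classic interval-partition DP over prefix sums (dp[j][i] = min over splits of max(dp[j-1][t], pre[i]-pre[t])); Pre_ excludes lists containing a negative page with 1 <= k < len(pages), which is outside the task's natural domain (pages are page counts) and where the two algorithms legitimately return different values.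
-- outside the precondition, e.g. on copy_books_binary_search([5, -2], 1): A returns 5, B returns 3
import Mathlib
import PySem

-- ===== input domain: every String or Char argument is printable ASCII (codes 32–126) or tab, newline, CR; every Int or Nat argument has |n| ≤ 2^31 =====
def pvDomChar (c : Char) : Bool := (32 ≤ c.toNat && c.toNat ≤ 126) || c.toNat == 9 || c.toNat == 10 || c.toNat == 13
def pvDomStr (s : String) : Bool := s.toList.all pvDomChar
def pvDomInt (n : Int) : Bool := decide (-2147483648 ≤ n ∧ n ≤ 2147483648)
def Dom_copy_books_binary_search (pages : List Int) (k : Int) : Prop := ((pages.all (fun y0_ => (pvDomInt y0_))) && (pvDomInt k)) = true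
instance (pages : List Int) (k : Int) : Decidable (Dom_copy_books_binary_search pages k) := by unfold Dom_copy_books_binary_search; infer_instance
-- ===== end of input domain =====

-- B replaces A's binary search on the answer with the interval-partition DP over prefix
-- sums (alternative algorithm, same return value on the stated precondition).

-- ===== PORT A =====

-- is_feasible's loop: early 'return False' is modelled by returning false from the recursion.
def pvFeasGo (limit k : Int) : List Int → Int → Int → Bool
  | [], count, _ => decide (count ≤ k)
  | p :: rest, count, cur =>
    if p > limit then false
    else if cur + p > limit then pvFeasGo limit k rest (count + 1) p
    else pvFeasGo limit k rest count (cur + p)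

def pvIsFeasible (pages : List Int) (k limit : Int) : Bool := pvFeasGo limit k pages 1 0

-- midpoint bounds, cited by pvBsLoop's termination proof
theorem pvMid_bounds (l r : Int) (h : l + 1 < r) :
    l < PySem.Int.floordiv (l + r) 2 ∧ PySem.Int.floordiv (l + r) 2 < r := by
  rw [PySem.Int.floordiv_eq_ediv_of_pos (by norm_num : (0:Int) < 2)]
  omega

-- the 'while left + 1 < right' loop, plus the final 'return left if is_feasible(left) else right'
def pvBsLoop (pages : List Int) (k left right : Int) : Int :=
  if h : left + 1 < right then
    let mid := PySem.Int.floordiv (left + right) 2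
    if pvIsFeasible pages k mid then pvBsLoop pages k left mid
    else pvBsLoop pages k mid right
  else if pvIsFeasible pages k left then left else right
termination_by (right - left).toNat
decreasing_by
  · have := pvMid_bounds left right h; omega
  · have := pvMid_bounds left right h; omega

def copy_books_binary_search (pages : List Int) (k : Int) : Int :=
  if pages = [] then 0
  else if k ≥ (pages.length : Int) then (PySem.List.max? pages (fun x => x)).getD 0
  else pvBsLoop pages k ((PySem.List.max? pages (fun x => x)).getD 0) pages.sum

-- ===== PORT B =====

-- pre = [0]; for p in pages: pre.append(pre[-1] + p)
def pvPrefix (pages : List Int) : List Int :=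
  pages.foldl (fun pre p => pre ++ [pre.getLastD 0 + p]) [0]

-- one DP round: row = [min(max(row[t], pre[i]-pre[t]) for t in range(i+1)) for i in range(n+1)]
def pvRowStep (pre : List Int) (n : Nat) (row : List Int) : List Int :=
  (List.range (n + 1)).map (fun i =>
    (PySem.List.min? ((List.range (i + 1)).map (fun t =>
        max (row.getD t 0) (pre.getD i 0 - pre.getD t 0))) (fun x => x)).getD 0)

def copy_books_binary_search_alt (pages : List Int) (k : Int) : Int :=
  if pages = [] then 0
  else if k ≥ (pages.length : Int) then (PySem.List.max? pages (fun x => x)).getD 0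
  else
    let n := pages.length
    let pre := pvPrefix pages
    let row := (List.range (k - 1).toNat).foldl (fun row _ => pvRowStep pre n row) pre
    row.getD n 0

-- ===== PRECONDITION & SPEC =====
-- Pre_ excludes only lists containing a negative page together with 1 ≤ k < len(pages):
-- negative page counts are outside the task's natural domain (pages are page counts), and
-- there A (a binary search bracketing between max(pages) and sum(pages)) and B (the minimal
-- achievable maximum workload) legitimately return different values.
def Pre_copy_books_binary_search (pages : List Int) (k : Int) : Prop :=
  pages = [] ∨ (pages.length : Int) ≤ k ∨ k ≤ 0 ∨ ∀ p ∈ pages, 0 ≤ p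

instance (pages : List Int) (k : Int) : Decidable (Pre_copy_books_binary_search pages k) := by
  unfold Pre_copy_books_binary_search; infer_instance

def pvWitness_copy_books_binary_search : List Int × Int := ([3, 1, 4, 1, 5], 2)

def Spec_copy_books_binary_search (pages : List Int) (k : Int) (out : Int) : Prop := out = copy_books_binary_search_alt pages k
instance (pages : List Int) (k : Int) (out : Int) : Decidable (Spec_copy_books_binary_search pages k out) := by unfold Spec_copy_books_binary_search; infer_instance

-- ===== CLAIM (what is proved, stated in full; the proofs are below) =====
def Claim_equal_copy_books_binary_search : Prop := ∀ (pages : List Int) (k : Int), Dom_copy_books_binary_search pages k → Pre_copy_books_binary_search pages k → Spec_copy_books_binary_search pages k (copy_books_binary_search pages k)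

-- ===== LEMMAS AND PROOFS =====

-- `PvSplit L j xs`: xs is a concatenation of at most j blocks, each of sum ≤ L.
inductive PvSplit (L : Int) : Nat → List Int → Prop
  | nil (j : Nat) : PvSplit L j []
  | cons (j : Nat) (b rest : List Int) (hb : b ≠ []) (hsum : b.sum ≤ L)
      (h : PvSplit L j rest) : PvSplit L (j + 1) (b ++ rest)

theorem pvSplit_succ {L : Int} {j : Nat} {xs : List Int} (h : PvSplit L j xs) :
    PvSplit L (j + 1) xs := by
  induction h with
  | nil j => exact PvSplit.nil _
  | cons j b rest hb hsum h ih => exact PvSplit.cons _ b rest hb hsum ih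

theorem pvSplit_mono_j {L : Int} {j j' : Nat} {xs : List Int} (h : PvSplit L j xs)
    (hj : j ≤ j') : PvSplit L j' xs := by
  induction j', hj using Nat.le_induction with
  | base => exact h
  | succ m hm ih => exact pvSplit_succ ih

theorem pvSplit_mono_L {L L' : Int} {j : Nat} {xs : List Int} (h : PvSplit L j xs)
    (hL : L ≤ L') : PvSplit L' j xs := by
  induction h with
  | nil j => exact PvSplit.nil _
  | cons j b rest hb hsum h ih => exact PvSplit.cons _ b rest hb (le_trans hsum hL) ih

theorem pvSplit_zero {L : Int} {xs : List Int} (h : PvSplit L 0 xs) : xs = [] := by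
  cases h; rfl

theorem pvSplit_elem_le {L : Int} {j : Nat} {xs : List Int} (hn : ∀ p ∈ xs, 0 ≤ p)
    (h : PvSplit L j xs) : ∀ p ∈ xs, p ≤ L := by
  induction h with
  | nil j => intro p hp; cases hp
  | cons j b rest hb hsum h ih =>
    intro p hp
    rcases List.mem_append.1 hp with hb' | hr
    · exact le_trans (List.single_le_sum (fun x hx => hn x (List.mem_append.2 (.inl hx))) p hb') hsum
    · exact ih (fun x hx => hn x (List.mem_append.2 (.inr hx))) p hr

theorem pvSplit_cases {L : Int} {j : Nat} {xs : List Int} (h : PvSplit L j xs) :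
    xs = [] ∨ ∃ j' b rest, j = j' + 1 ∧ xs = b ++ rest ∧ b ≠ [] ∧ b.sum ≤ L ∧
      PvSplit L j' rest := by
  cases h with
  | nil j => exact .inl rfl
  | cons j b rest hb hsum h => exact .inr ⟨j, b, rest, rfl, rfl, hb, hsum, h⟩

theorem pvSplit_drop_head {L p : Int} {j : Nat} {xs : List Int} (hp : 0 ≤ p)
    (h : PvSplit L j (p :: xs)) : PvSplit L j xs := by
  rcases pvSplit_cases h with hnil | ⟨j', b, rest, rfl, heq, hb, hsum, hrest⟩
  · cases hnil
  · cases b with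
    | nil => exact absurd rfl hb
    | cons q b' =>
      obtain ⟨rfl, rfl⟩ : q = p ∧ b' ++ rest = xs := by
        simpa using heq.symm
      cases b' with
      | nil => simpa using pvSplit_succ hrest
      | cons q' b'' =>
        refine PvSplit.cons _ (q' :: b'') rest (by simp) ?_ hrest
        have h1 := hsum
        simp at h1 ⊢
        omega

theorem pvSplit_append_last {L : Int} {j : Nat} {ys zs : List Int} (h : PvSplit L j ys)
    (hz : zs.sum ≤ L) : PvSplit L (j + 1) (ys ++ zs) := by
  induction h with
  | nil j =>
    simp only [List.nil_append]
    rcases eq_or_ne zs [] with rfl | hne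
    · exact PvSplit.nil _
    · have := PvSplit.cons (L := L) j zs [] hne hz (PvSplit.nil _)
      simpa using this
  | cons j b rest hb hsum h ih =>
    have := PvSplit.cons (L := L) (j + 1) b (rest ++ zs) hb hsum ih
    simpa [List.append_assoc] using this

theorem pvSplit_decompose {L : Int} {m : Nat} {xs : List Int} (hL : 0 ≤ L)
    (h : PvSplit L m xs) (hm : 0 < m) :
    ∃ t, t ≤ xs.length ∧ PvSplit L (m - 1) (xs.take t) ∧ (xs.drop t).sum ≤ L := by
  induction h with
  | nil j => exact ⟨0, by simp, PvSplit.nil _, by simpa using hL⟩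
  | cons j b rest hb hsum h ih =>
    rcases Nat.eq_zero_or_pos j with rfl | hj
    · have : rest = [] := pvSplit_zero h
      subst this
      exact ⟨0, by simp, by simpa using PvSplit.nil 0, by simpa using hsum⟩
    · obtain ⟨t', ht'len, ht'split, ht'sum⟩ := ih hj
      refine ⟨b.length + t', ?_, ?_, ?_⟩
      · simp; omega
      · rw [List.take_length_add_append]
        have : PvSplit L ((j - 1) + 1) (b ++ rest.take t') :=
          PvSplit.cons _ b (rest.take t') hb hsum ht'split
        simpa [Nat.sub_add_cancel hj] using this
      · rw [List.drop_length_add_append]; exact ht'sum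

-- prefix-sum characterisation -------------------------------------------------

def pvScan (s : Int) : List Int → List Int
  | [] => []
  | p :: r => (s + p) :: pvScan (s + p) r

theorem pvPrefix_go (xs : List Int) : ∀ (acc : List Int), acc ≠ [] →
    xs.foldl (fun pre p => pre ++ [pre.getLastD 0 + p]) acc = acc ++ pvScan (acc.getLastD 0) xs := by
  induction xs with
  | nil => intro acc _; simp [pvScan]
  | cons p r ih =>
    intro acc hacc
    simp only [List.foldl_cons]
    rw [ih (acc ++ [acc.getLastD 0 + p]) (by simp)]
    simp [pvScan, List.getLastD_concat]

theorem pvPrefix_eq (xs : List Int) : pvPrefix xs = 0 :: pvScan 0 xs := by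
  have := pvPrefix_go xs [0] (by simp)
  simpa [pvPrefix] using this

theorem pvScan_length (xs : List Int) : ∀ s, (pvScan s xs).length = xs.length := by
  induction xs with
  | nil => intro s; rfl
  | cons p r ih => intro s; simp [pvScan, ih]

theorem pvScan_getD (xs : List Int) : ∀ (s : Int) (j : Nat), j < xs.length →
    (pvScan s xs).getD j 0 = s + (xs.take (j + 1)).sum := by
  induction xs with
  | nil => intro s j h; simp at h
  | cons p r ih =>
    intro s j h
    cases j with
    | zero => simp [pvScan]
    | succ j =>
      simp only [pvScan, List.getD_cons_succ]
      rw [ih (s + p) j (by simpa using h)]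
      simp [List.take_succ_cons]; ring

theorem pvPrefix_getD (xs : List Int) (i : Nat) (hi : i ≤ xs.length) :
    (pvPrefix xs).getD i 0 = (xs.take i).sum := by
  rw [pvPrefix_eq]
  cases i with
  | zero => simp
  | succ i =>
    simp only [List.getD_cons_succ]
    rw [pvScan_getD xs 0 i (by omega)]
    simp

-- greedy feasibility ↔ PvSplit -----------------------------------------------

theorem pvFeasGo_false_of_gt {L k : Int} {xs : List Int} (h : ∃ p ∈ xs, L < p) :
    ∀ c s, pvFeasGo L k xs c s = false := by
  induction xs with
  | nil => rcases h with ⟨p, hp, _⟩; cases hp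
  | cons q r ih =>
    intro c s
    rcases h with ⟨p, hp, hLp⟩
    simp only [pvFeasGo]
    by_cases hq : q > L
    · simp [hq]
    · have hpr : ∃ p ∈ r, L < p := by
        rcases List.mem_cons.1 hp with rfl | hr
        · omega
        · exact ⟨p, hr, hLp⟩
      split_ifs with h1
      · exact ih hpr _ _
      · exact ih hpr _ _

theorem pvFeasGo_false_of_k_nonpos {L k : Int} (hk : k ≤ 0) (xs : List Int) :
    ∀ c s, 1 ≤ c → pvFeasGo L k xs c s = false := by
  induction xs with
  | nil => intro c s hc; simp [pvFeasGo]; omega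
  | cons p r ih =>
    intro c s hc
    simp only [pvFeasGo]
    split_ifs with h1 h2
    · rfl
    · exact ih _ _ (by omega)
    · exact ih _ _ hc

theorem pvFeasGo_sound {L k : Int} {xs : List Int} (hn : ∀ p ∈ xs, 0 ≤ p) :
    ∀ c s, 0 ≤ s → s ≤ L → pvFeasGo L k xs c s = true →
    (∀ p ∈ xs, p ≤ L) ∧ ∃ (i j : Nat), i ≤ xs.length ∧ (xs.take i).sum ≤ L - s ∧
      PvSplit L j (xs.drop i) ∧ c + (j : Int) ≤ k := by
  induction xs with
  | nil =>
    intro c s _ hsL h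
    simp only [pvFeasGo, decide_eq_true_eq] at h
    exact ⟨by simp, 0, 0, by simp, by simpa using hsL, PvSplit.nil _, by simpa using h⟩
  | cons p r ih =>
    intro c s hs hsL h
    have hp : 0 ≤ p := hn p (by simp)
    have hnr : ∀ q ∈ r, 0 ≤ q := fun q hq => hn q (by simp [hq])
    simp only [pvFeasGo] at h
    split_ifs at h with h1 h2
    · -- cur + p > limit: new copier
      have hpL : p ≤ L := by omega
      obtain ⟨hle, i, j, hilen, hisum, hsplit, hcount⟩ := ih hnr (c + 1) p hp hpL h
      refine ⟨?_, 0, j + 1, by simp, by simpa using hsL, ?_, by push_cast; omega⟩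
      · intro q hq; rcases List.mem_cons.1 hq with rfl | hq
        · exact hpL
        · exact hle q hq
      · have : PvSplit L (j + 1) ((p :: r.take i) ++ r.drop i) := by
          refine PvSplit.cons _ _ _ (by simp) ?_ hsplit
          have h0 : 0 ≤ (r.take i).sum :=
            List.sum_nonneg (fun x hx => hnr x (List.mem_of_mem_take hx))
          simp; omega
        simpa [List.take_append_drop] using this
    · -- absorbed into the current copier
      have hpL : p ≤ L := by omega
      obtain ⟨hle, i, j, hilen, hisum, hsplit, hcount⟩ := ih hnr c (s + p) (by omega) (by omega) h
      refine ⟨?_, i + 1, j, by simpa using hilen, by simp; omega, hsplit, hcount⟩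
      intro q hq; rcases List.mem_cons.1 hq with rfl | hq
      · exact hpL
      · exact hle q hq

theorem pvFeasGo_complete {L k : Int} {xs : List Int} (hn : ∀ p ∈ xs, 0 ≤ p)
    (hle : ∀ p ∈ xs, p ≤ L) :
    ∀ c s i j, 0 ≤ s → s ≤ L → i ≤ xs.length → (xs.take i).sum ≤ L - s →
      PvSplit L j (xs.drop i) → c + (j : Int) ≤ k → pvFeasGo L k xs c s = true := by
  induction xs with
  | nil =>
    intro c s i j _ _ _ _ _ hcount
    simp only [pvFeasGo, decide_eq_true_eq]
    omega
  | cons p r ih =>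
    intro c s i j hs hsL hilen hisum hsplit hcount
    have hp : 0 ≤ p := hn p (by simp)
    have hpL : p ≤ L := hle p (by simp)
    have hnr : ∀ q ∈ r, 0 ≤ q := fun q hq => hn q (by simp [hq])
    have hler : ∀ q ∈ r, q ≤ L := fun q hq => hle q (by simp [hq])
    simp only [pvFeasGo, if_neg (by omega : ¬ p > L)]
    split_ifs with h2
    · -- s + p > L: the loop starts a new copier at p
      cases i with
      | succ i' =>
        -- impossible: the pending first chunk contains p, so s + p ≤ L
        exfalso
        have h0 : 0 ≤ (r.take i').sum :=
          List.sum_nonneg (fun x hx => hnr x (List.mem_of_mem_take hx))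
        simp [List.take_succ_cons] at hisum
        omega
      | zero =>
        simp only [List.drop_zero] at hsplit
        rcases pvSplit_cases hsplit with hnil | ⟨j', b, rest, rfl, heq, hb, hsum, hrest⟩
        · cases hnil
        · cases b with
          | nil => exact absurd rfl hb
          | cons q b' =>
            obtain ⟨hqp, hxs⟩ : q = p ∧ b' ++ rest = r := by simpa using heq.symm
            subst hqp
            refine ih hnr hler (c + 1) q b'.length j' hp hpL ?_ ?_ ?_ (by push_cast at hcount ⊢; omega)
            · rw [← hxs]; simp
            · rw [← hxs, List.take_left]
              have h1 := hsum; simp at h1; omega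
            · rw [← hxs, List.drop_left]; exact hrest
    · -- absorbed: s + p ≤ L
      cases i with
      | zero =>
        simp only [List.drop_zero] at hsplit
        exact ih hnr hler c (s + p) 0 j (by omega) (by omega) (by simp) (by simp; omega)
          (by simpa using pvSplit_drop_head hp hsplit) hcount
      | succ i' =>
        simp [List.take_succ_cons] at hisum
        exact ih hnr hler c (s + p) i' j (by omega) (by omega) (by simpa using hilen)
          (by omega) (by simpa using hsplit) hcount

theorem pvFeas_sound {L k : Int} {xs : List Int} (hn : ∀ p ∈ xs, 0 ≤ p) (hL : 0 ≤ L)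
    (h : pvIsFeasible xs k L = true) :
    (∀ p ∈ xs, p ≤ L) ∧ PvSplit L k.toNat xs := by
  obtain ⟨hle, i, j, hilen, hisum, hsplit, hcount⟩ :=
    pvFeasGo_sound hn 1 0 le_rfl hL h
  refine ⟨hle, ?_⟩
  have hjk : j + 1 ≤ k.toNat := by omega
  cases i with
  | zero =>
    simp only [List.drop_zero] at hsplit
    exact pvSplit_mono_j hsplit (by omega)
  | succ i' =>
    have : PvSplit L (j + 1) (xs.take (i' + 1) ++ xs.drop (i' + 1)) := by
      refine PvSplit.cons _ _ _ ?_ (by omega) hsplit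
      have : xs ≠ [] := by intro h'; subst h'; simp at hilen
      cases xs with
      | nil => simp at hilen
      | cons a t => simp [List.take_succ_cons]
    rw [List.take_append_drop] at this
    exact pvSplit_mono_j this hjk

theorem pvFeas_complete {L k : Int} {xs : List Int} (hn : ∀ p ∈ xs, 0 ≤ p) (hL : 0 ≤ L)
    (hk : 0 < k) (hle : ∀ p ∈ xs, p ≤ L) (hs : PvSplit L k.toNat xs) :
    pvIsFeasible xs k L = true := by
  cases xs with
  | nil => simp [pvIsFeasible, pvFeasGo]; omega
  | cons p r =>
    rcases pvSplit_cases hs with hnil | ⟨j', b, rest, hj, heq, hb, hsum, hrest⟩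
    · cases hnil
    · refine pvFeasGo_complete hn hle 1 0 b.length j' le_rfl hL ?_ ?_ ?_ ?_
      · rw [heq]; simp
      · rw [heq, List.take_left]; omega
      · rw [heq, List.drop_left]; exact hrest
      · have : (j' : Int) + 1 = (k.toNat : Int) := by omega
        omega

theorem pvFeas_mono {k : Int} {xs : List Int} (hne : xs ≠ []) (hn : ∀ p ∈ xs, 0 ≤ p)
    (hk : 0 < k) : ∀ a b : Int, a ≤ b → pvIsFeasible xs k a = true →
    pvIsFeasible xs k b = true := by
  intro a b hab ha
  cases xs with
  | nil => exact absurd rfl hne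
  | cons p r =>
    have hp : 0 ≤ p := hn p (by simp)
    have hpa : p ≤ a := by
      by_contra hlt
      have := pvFeasGo_false_of_gt (L := a) (k := k) (xs := p :: r) ⟨p, List.mem_cons_self, by omega⟩ 1 0
      rw [pvIsFeasible] at ha
      simp [this] at ha
    have ha0 : 0 ≤ a := le_trans hp hpa
    obtain ⟨hle, hsplit⟩ := pvFeas_sound hn ha0 ha
    by_cases hk' : 0 < k
    · exact pvFeas_complete hn (by omega) hk'
        (fun q hq => le_trans (hle q hq) hab) (pvSplit_mono_L hsplit hab)
    · exfalso
      have := pvFeasGo_false_of_k_nonpos (L := a) (by omega : k ≤ 0) (p :: r) 1 0 le_rfl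
      rw [pvIsFeasible] at ha
      simp [this] at ha

-- binary-search loop ----------------------------------------------------------

theorem pvBsLoop_spec {pages : List Int} {k : Int}
    (hmono : ∀ a b : Int, a ≤ b → pvIsFeasible pages k a = true → pvIsFeasible pages k b = true) :
    ∀ (n : Nat) (left right : Int), (right - left).toNat = n → left ≤ right →
      (∀ L, pvIsFeasible pages k L = true → left ≤ L) →
      pvIsFeasible pages k right = true →
      pvIsFeasible pages k (pvBsLoop pages k left right) = true ∧
        ∀ L, pvIsFeasible pages k L = true → pvBsLoop pages k left right ≤ L := by
  intro n
  induction n using Nat.strong_induction_on with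
  | _ n ih =>
    intro left right hn hlr hlow hr
    rw [pvBsLoop]
    by_cases h1 : left + 1 < right
    · rw [dif_pos h1]
      dsimp only
      set mid := PySem.Int.floordiv (left + right) 2 with hmid
      have hb := pvMid_bounds left right h1
      by_cases hf : pvIsFeasible pages k mid = true
      · rw [if_pos hf]
        exact ih (mid - left).toNat (by omega) left mid rfl (by omega) hlow hf
      · rw [if_neg hf]
        refine ih (right - mid).toNat (by omega) mid right rfl (by omega) ?_ hr
        intro L hL
        by_contra hlt
        exact hf (hmono L mid (by omega) hL)
    · rw [dif_neg h1]
      by_cases hf : pvIsFeasible pages k left = true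
      · rw [if_pos hf]
        exact ⟨hf, hlow⟩
      · rw [if_neg hf]
        refine ⟨hr, ?_⟩
        intro L hL
        have h2 := hlow L hL
        have h3 : L ≠ left := by intro h'; subst h'; exact hf hL
        omega

theorem pvBsLoop_all_false {pages : List Int} {k : Int}
    (hf : ∀ m : Int, pvIsFeasible pages k m = false) :
    ∀ (n : Nat) (left right : Int), (right - left).toNat = n →
      pvBsLoop pages k left right = right := by
  intro n
  induction n using Nat.strong_induction_on with
  | _ n ih =>
    intro left right hn
    rw [pvBsLoop]
    by_cases h1 : left + 1 < right
    · have hb := pvMid_bounds left right h1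
      rw [dif_pos h1]
      dsimp only
      rw [if_neg (by simp [hf])]
      exact ih (right - PySem.Int.floordiv (left + right) 2).toNat (by omega) _ right rfl
    · rw [dif_neg h1, if_neg (by simp [hf])]

-- DP invariant ----------------------------------------------------------------

def PvInv (pages : List Int) (m : Nat) (row : List Int) : Prop :=
  row.length = pages.length + 1 ∧ ∀ i ≤ pages.length,
    PvSplit (row.getD i 0) (m + 1) (pages.take i) ∧
    ∀ L, 0 ≤ L → PvSplit L (m + 1) (pages.take i) → row.getD i 0 ≤ L

theorem pvInv_zero {pages : List Int} : PvInv pages 0 (pvPrefix pages) := by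
  refine ⟨by rw [pvPrefix_eq]; simp [pvScan_length], ?_⟩
  intro i hi
  rw [pvPrefix_getD pages i hi]
  constructor
  · rcases eq_or_ne (pages.take i) [] with h | h
    · rw [h]; exact PvSplit.nil _
    · have := PvSplit.cons (L := (pages.take i).sum) 0 (pages.take i) [] h le_rfl (PvSplit.nil _)
      simpa using this
  · intro L hL hs
    rcases pvSplit_cases hs with hnil | ⟨j', b, rest, hj, heq, hb, hsum, hrest⟩
    · rw [hnil]; simpa using hL
    · obtain rfl : j' = 0 := by omega
      have : rest = [] := pvSplit_zero hrest
      subst this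
      rw [heq]; simpa using hsum

theorem pvInv_step {pages : List Int} {m : Nat} {row : List Int}
    (h : PvInv pages m row) : PvInv pages (m + 1) (pvRowStep (pvPrefix pages) pages.length row) := by
  obtain ⟨hlen, hrow⟩ := h
  refine ⟨by simp [pvRowStep], ?_⟩
  intro i hi
  have hval : (pvRowStep (pvPrefix pages) pages.length row).getD i 0 =
      (PySem.List.min? ((List.range (i + 1)).map (fun t =>
        max (row.getD t 0) ((pvPrefix pages).getD i 0 - (pvPrefix pages).getD t 0)))
        (fun x => x)).getD 0 := by
    rw [pvRowStep, List.getD_eq_getElem _ _ (by simp; omega)]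
    simp
  obtain ⟨m0, hm0⟩ : ∃ m0, PySem.List.min? ((List.range (i + 1)).map (fun t =>
      max (row.getD t 0) ((pvPrefix pages).getD i 0 - (pvPrefix pages).getD t 0)))
      (fun x => x) = some m0 := by
    cases hmin : PySem.List.min? ((List.range (i + 1)).map (fun t =>
        max (row.getD t 0) ((pvPrefix pages).getD i 0 - (pvPrefix pages).getD t 0)))
        (fun x => x) with
    | none =>
      have := (PySem.List.min?_eq_none_iff _ _).1 hmin
      simp at this
    | some m0 => exact ⟨m0, rfl⟩
  have hmem := PySem.List.min?_mem hm0
  have hisMin := PySem.List.min?_isMin hm0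
  obtain ⟨t0, ht0, hm0t0⟩ := List.mem_map.1 hmem
  have ht0i : t0 ≤ i := Nat.lt_succ_iff.1 (List.mem_range.1 ht0)
  have hseg : ∀ t, t ≤ i → ((pages.take i).drop t).sum =
      (pvPrefix pages).getD i 0 - (pvPrefix pages).getD t 0 := by
    intro t ht
    rw [pvPrefix_getD pages i hi, pvPrefix_getD pages t (le_trans ht hi)]
    have h1 : (pages.take i).take t = pages.take t := by
      rw [List.take_take, Nat.min_eq_left ht]
    have h2 : (pages.take i).sum = ((pages.take i).take t).sum + ((pages.take i).drop t).sum := by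
      conv_lhs => rw [← List.take_append_drop t (pages.take i)]
      rw [List.sum_append]
    rw [h1] at h2
    omega
  rw [hval, hm0, Option.getD_some]
  constructor
  · -- achievability
    have hsplit0 : PvSplit (row.getD t0 0) (m + 1) (pages.take t0) :=
      (hrow t0 (le_trans ht0i hi)).1
    have hstep : PvSplit m0 (m + 1 + 1) (pages.take t0 ++ (pages.take i).drop t0) := by
      refine pvSplit_append_last (pvSplit_mono_L hsplit0 ?_) ?_
      · rw [← hm0t0]; exact le_max_left _ _
      · rw [hseg t0 ht0i, ← hm0t0]
        exact le_max_right _ _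
    have heq : pages.take t0 ++ (pages.take i).drop t0 = pages.take i := by
      have h1 : (pages.take i).take t0 = pages.take t0 := by
        rw [List.take_take, Nat.min_eq_left ht0i]
      conv_rhs => rw [← List.take_append_drop t0 (pages.take i)]
      rw [h1]
    rw [← heq]
    exact hstep
  · -- optimality
    intro L hL hs
    obtain ⟨t, htlen, htsplit, htsum⟩ := pvSplit_decompose hL hs (by omega)
    have hti : t ≤ i := by
      have : (pages.take i).length = i := by
        rw [List.length_take]; omega
      omega
    have h1 : (pages.take i).take t = pages.take t := by
      rw [List.take_take, Nat.min_eq_left hti]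
    rw [h1] at htsplit
    have hopt : row.getD t 0 ≤ L := by
      have := (hrow t (le_trans hti hi)).2 L hL
      simp only [Nat.add_sub_cancel] at htsplit
      exact this htsplit
    have hsum : (pvPrefix pages).getD i 0 - (pvPrefix pages).getD t 0 ≤ L := by
      rw [← hseg t hti]; exact htsum
    have : m0 ≤ max (row.getD t 0) ((pvPrefix pages).getD i 0 - (pvPrefix pages).getD t 0) :=
      hisMin _ (List.mem_map.2 ⟨t, List.mem_range.2 (by omega), rfl⟩)
    have hft := max_le hopt hsum
    omega

theorem pvInv_iter (pages : List Int) (m : Nat) :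
    PvInv pages m ((List.range m).foldl
      (fun row _ => pvRowStep (pvPrefix pages) pages.length row) (pvPrefix pages)) := by
  induction m with
  | zero => simpa using pvInv_zero
  | succ m ih =>
    rw [List.range_succ, List.foldl_append]
    simpa using pvInv_step ih

-- ===== VERDICT (by name: the statement is the Claim_ definition above) =====
theorem copy_books_binary_search_spec : Claim_equal_copy_books_binary_search := by
  intro pages k _ hpre
  show copy_books_binary_search pages k = copy_books_binary_search_alt pages k
  by_cases h0 : pages = []
  · simp [copy_books_binary_search, copy_books_binary_search_alt, h0]
  by_cases hk1 : k ≥ (pages.length : Int)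
  · simp [copy_books_binary_search, copy_books_binary_search_alt, h0, hk1]
  rw [copy_books_binary_search, copy_books_binary_search_alt,
    if_neg h0, if_neg h0, if_neg hk1, if_neg hk1]
  by_cases hk0 : k ≤ 0
  · -- k ≤ 0: is_feasible is identically false, A's loop keeps right = sum(pages);
    -- B does zero DP rounds and returns pre[n] = sum(pages)
    have hfalse : ∀ m : Int, pvIsFeasible pages k m = false := fun m =>
      pvFeasGo_false_of_k_nonpos hk0 pages 1 0 le_rfl
    rw [pvBsLoop_all_false hfalse _ _ _ rfl]
    have hrange : (k - 1).toNat = 0 := by omega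
    rw [hrange]
    simp only [List.range_zero, List.foldl_nil]
    rw [pvPrefix_getD pages pages.length le_rfl, List.take_length]
  · -- 1 ≤ k < len(pages): both sides equal the least feasible time
    have hk' : 0 < k := by omega
    have hn : ∀ p ∈ pages, 0 ≤ p := by
      rcases hpre with h | h | h | h
      · exact absurd h h0
      · exact absurd h (by omega)
      · exact absurd h hk0
      · exact h
    obtain ⟨m0, hmax⟩ : ∃ m0, PySem.List.max? pages (fun x => x) = some m0 := by
      cases hmaxe : PySem.List.max? pages (fun x => x) with
      | none => exact absurd ((PySem.List.max?_eq_none_iff pages _).1 hmaxe) h0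
      | some m0 => exact ⟨m0, rfl⟩
    have hm0mem : m0 ∈ pages := PySem.List.max?_mem hmax
    have hm0nn : 0 ≤ m0 := hn m0 hm0mem
    have hsumnn : 0 ≤ pages.sum := List.sum_nonneg hn
    have hmono := pvFeas_mono h0 hn hk'
    have hlow : ∀ L, pvIsFeasible pages k L = true → m0 ≤ L := by
      intro L hL
      by_contra hlt
      have := pvFeasGo_false_of_gt (L := L) (k := k) (xs := pages)
        ⟨m0, hm0mem, by omega⟩ 1 0
      rw [pvIsFeasible] at hL
      simp [this] at hL
    have hsplit1 : PvSplit pages.sum k.toNat pages := by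
      have h1 : PvSplit pages.sum 1 (pages ++ []) :=
        PvSplit.cons _ pages [] h0 le_rfl (PvSplit.nil _)
      exact pvSplit_mono_j (by simpa using h1) (by omega)
    have hr : pvIsFeasible pages k pages.sum = true :=
      pvFeas_complete hn hsumnn hk' (List.single_le_sum hn) hsplit1
    have hlr : m0 ≤ pages.sum := List.single_le_sum hn m0 hm0mem
    obtain ⟨hRf, hRmin⟩ := pvBsLoop_spec hmono (pages.sum - m0).toNat m0 pages.sum rfl hlr hlow hr
    -- B side: DP invariant after (k-1) rounds
    have hinv := pvInv_iter pages (k - 1).toNat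
    have hidx : (k - 1).toNat + 1 = k.toNat := by omega
    obtain ⟨-, hinv2⟩ := hinv
    obtain ⟨hVach, hVopt⟩ := hinv2 pages.length le_rfl
    rw [hidx, List.take_length] at hVach hVopt
    set V := ((List.range (k - 1).toNat).foldl
      (fun row _ => pvRowStep (pvPrefix pages) pages.length row) (pvPrefix pages)).getD
        pages.length 0 with hV
    have hVle : ∀ p ∈ pages, p ≤ V := pvSplit_elem_le hn hVach
    have hV0 : 0 ≤ V := le_trans hm0nn (hVle m0 hm0mem)
    have hVf : pvIsFeasible pages k V = true := pvFeas_complete hn hV0 hk' hVle hVach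
    have h1 : pvBsLoop pages k m0 pages.sum ≤ V := hRmin V hVf
    have h2 : V ≤ pvBsLoop pages k m0 pages.sum := by
      have hR0 : 0 ≤ pvBsLoop pages k m0 pages.sum := le_trans hm0nn (hlow _ hRf)
      obtain ⟨-, hRsplit⟩ := pvFeas_sound hn hR0 hRf
      exact hVopt _ hR0 hRsplit
    rw [hmax, Option.getD_some]
    omega
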